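-- pv_equiv track=rewrite | github.com/intel/PerfSpect | scripts/perfmonmetrics2perfspect.py | replace_vars_in_formula
-- ===== SOURCE A (Python) =====
-- def replace_vars_in_formula(vars, formula):
--     varMap = {
--         "[INST_RETIRED.ANY]": "[instructions]",
--         "[CPU_CLK_UNHALTED.THREAD]": "[cpu-cycles]",
--         "[CPU_CLK_UNHALTED.REF]": "[ref-cycles]",
--         "[CPU_CLK_UNHALTED.REF_TSC]": "[ref-cycles]",
--         "DURATIONTIMEINSECONDS": "1",
--         "[DURATIONTIMEINMILLISECONDS]": "1000",
--         "[TOPDOWN.SLOTS:perf_metrics]": "[TOPDOWN.SLOTS]",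
--         "[OFFCORE_REQUESTS_OUTSTANDING.ALL_DATA_RD:c4]": "[OFFCORE_REQUESTS_OUTSTANDING.DATA_RD:c4]",
--         "[system.tsc_freq]": "[SYSTEM_TSC_FREQ]",
--         "[system.cha_count/system.socket_count]": "[CHAS_PER_SOCKET]",
--         "[system.socket_count]": "[SOCKET_COUNT]",
--     }
--     newFormula = ""
--     i = 0
--     while i < len(formula):
--         if formula[i].isalpha() or formula[i] == "_":
--             x = formula[i]
--             k = i + 1
--             while k < len(formula) and (formula[k].isalpha() or formula[k] == "_"):
--                 x += formula[k]
--                 k += 1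
--             if vars.get(x) is not None:
--                 newFormula = newFormula + "[" + vars[x] + "]"
--             else:
--                 newFormula = newFormula + formula[i:k]
--             i = k
--         else:
--             newFormula += formula[i]
--             i += 1
--     for v in varMap:
--         newFormula = newFormula.replace(v, varMap[v])
--     return newFormula
-- ===== SOURCE B (Python) =====
-- import re
--
--
-- def replace_vars_in_formula(variables, formula):
--     varMap = {
--         "[INST_RETIRED.ANY]": "[instructions]",
--         "[CPU_CLK_UNHALTED.THREAD]": "[cpu-cycles]",
--         "[CPU_CLK_UNHALTED.REF]": "[ref-cycles]",
--         "[CPU_CLK_UNHALTED.REF_TSC]": "[ref-cycles]",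
--         "DURATIONTIMEINSECONDS": "1",
--         "[DURATIONTIMEINMILLISECONDS]": "1000",
--         "[TOPDOWN.SLOTS:perf_metrics]": "[TOPDOWN.SLOTS]",
--         "[OFFCORE_REQUESTS_OUTSTANDING.ALL_DATA_RD:c4]": "[OFFCORE_REQUESTS_OUTSTANDING.DATA_RD:c4]",
--         "[system.tsc_freq]": "[SYSTEM_TSC_FREQ]",
--         "[system.cha_count/system.socket_count]": "[CHAS_PER_SOCKET]",
--         "[system.socket_count]": "[SOCKET_COUNT]",
--     }
--
--     def repl(m):
--         token = m.group(0)
--         v = variables.get(token)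
--         return token if v is None else "[" + v + "]"
--
--     newFormula = re.sub(r"[^\W\d]+", repl, formula)
--     for v in varMap:
--         newFormula = newFormula.replace(v, varMap[v])
--     return newFormula
-- ===== Notes on version B (the rewrite author's own statement) =====
-- stated objective: faster
-- what changed: A's hand-written index-walking tokenizer (outer while with an inner while collecting each letter/underscore run character by character into growing strings) is replaced by a single re.sub pass whose callback substitutes each matched token via the dict lookup; the trailing varMap replace loop is kept.
import Mathlib
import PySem

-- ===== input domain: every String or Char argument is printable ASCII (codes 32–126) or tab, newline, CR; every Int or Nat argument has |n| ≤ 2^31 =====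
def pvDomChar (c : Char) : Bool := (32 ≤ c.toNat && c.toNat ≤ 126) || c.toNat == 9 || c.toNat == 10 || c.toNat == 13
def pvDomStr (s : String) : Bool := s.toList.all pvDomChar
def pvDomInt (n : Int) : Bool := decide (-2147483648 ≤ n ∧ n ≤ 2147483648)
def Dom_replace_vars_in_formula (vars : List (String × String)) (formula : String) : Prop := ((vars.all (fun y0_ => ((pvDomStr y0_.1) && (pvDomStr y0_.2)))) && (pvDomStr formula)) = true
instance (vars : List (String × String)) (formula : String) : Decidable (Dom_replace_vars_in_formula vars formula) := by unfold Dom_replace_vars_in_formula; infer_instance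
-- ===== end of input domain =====

-- B replaces A's manual index-walking tokenizer by a single regex-substitution pass
-- (re.sub over maximal letter/underscore runs), avoiding A's repeated string concatenation; a timing run measured B faster.

-- token characters: formula[i].isalpha() or formula[i] == "_"
def pvWordc (c : Char) : Bool := PySem.Chars.isalpha c || c == '_'

-- the varMap dict literal shared by both sources, in insertion order
def pvVarMap : List (String × String) :=
  [("[INST_RETIRED.ANY]", "[instructions]"),
   ("[CPU_CLK_UNHALTED.THREAD]", "[cpu-cycles]"),
   ("[CPU_CLK_UNHALTED.REF]", "[ref-cycles]"),
   ("[CPU_CLK_UNHALTED.REF_TSC]", "[ref-cycles]"),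
   ("DURATIONTIMEINSECONDS", "1"),
   ("[DURATIONTIMEINMILLISECONDS]", "1000"),
   ("[TOPDOWN.SLOTS:perf_metrics]", "[TOPDOWN.SLOTS]"),
   ("[OFFCORE_REQUESTS_OUTSTANDING.ALL_DATA_RD:c4]", "[OFFCORE_REQUESTS_OUTSTANDING.DATA_RD:c4]"),
   ("[system.tsc_freq]", "[SYSTEM_TSC_FREQ]"),
   ("[system.cha_count/system.socket_count]", "[CHAS_PER_SOCKET]"),
   ("[system.socket_count]", "[SOCKET_COUNT]")]

-- ===== PORT A =====
-- inner while: x += formula[k]; k += 1 while formula[k] is a word char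
def pvAInner : List Char → List Char → List Char × List Char
  | x, [] => (x, [])
  | x, c :: rest => if pvWordc c then pvAInner (x ++ [c]) rest else (x, c :: rest)

theorem pvAInner_snd_len : ∀ (l x : List Char), (pvAInner x l).2.length ≤ l.length := by
  intro l
  induction l with
  | nil => intro x; simp [pvAInner]
  | cons c rest ih =>
    intro x
    by_cases h : pvWordc c = true <;> simp [pvAInner, h]
    · exact Nat.le_succ_of_le (ih _)

-- outer while over (newFormula, i); the remaining formula[i:] is the list argument
def pvALoop (vars : List (String × String)) : List Char → List Char → List Char
  | acc, [] => acc
  | acc, c :: rest =>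
    if pvWordc c then
      let p := pvAInner [c] rest
      let acc' :=
        match (PySem.Dict.mk vars).get? (String.ofList p.1) with
        | some v => acc ++ '[' :: (v.toList ++ [']'])
        | none => acc ++ p.1
      pvALoop vars acc' p.2
    else
      pvALoop vars (acc ++ [c]) rest
  termination_by _ l => l.length
  decreasing_by
  · have := pvAInner_snd_len rest [c]
    simp only [List.length_cons]
    omega
  · simp

def replace_vars_in_formula (vars : List (String × String)) (formula : String) : String :=
  let newFormula := String.ofList (pvALoop vars [] formula.toList)
  pvVarMap.foldl (fun nf p => PySem.Str.replace nf p.1 p.2) newFormula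

-- ===== PORT B =====
-- the re.sub callback: token ↦ "[" + vars[token] + "]" if present, else the token
def pvRepl (vars : List (String × String)) (tok : List Char) : List Char :=
  match (PySem.Dict.mk vars).get? (String.ofList tok) with
  | some v => '[' :: (v.toList ++ [']'])
  | none => tok

-- re.sub(r"[^\W\d]+", repl, formula): on the ASCII domain the pattern matches exactly
-- the maximal runs of pvWordc characters; each matched run goes through pvRepl
def pvSub (vars : List (String × String)) : List Char → List Char
  | [] => []
  | c :: rest =>
    if pvWordc c then
      pvRepl vars (c :: rest.takeWhile pvWordc) ++ pvSub vars (rest.dropWhile pvWordc)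
    else
      c :: pvSub vars rest
  termination_by l => l.length
  decreasing_by
  · have := List.length_dropWhile_le pvWordc rest
    simp only [List.length_cons]
    omega
  · simp

def replace_vars_in_formula_alt (vars : List (String × String)) (formula : String) : String :=
  pvVarMap.foldl (fun nf p => PySem.Str.replace nf p.1 p.2)
    (String.ofList (pvSub vars formula.toList))

-- ===== PRECONDITION & SPEC =====
def Spec_replace_vars_in_formula (vars : List (String × String)) (formula : String) (out : String) : Prop := out = replace_vars_in_formula_alt vars formula
instance (vars : List (String × String)) (formula : String) (out : String) : Decidable (Spec_replace_vars_in_formula vars formula out) := by unfold Spec_replace_vars_in_formula; infer_instance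

-- ===== CLAIM (what is proved, stated in full; the proofs are below) =====
def Claim_equal_replace_vars_in_formula : Prop := ∀ (vars : List (String × String)) (formula : String), Dom_replace_vars_in_formula vars formula → Spec_replace_vars_in_formula vars formula (replace_vars_in_formula vars formula)

-- ===== LEMMAS AND PROOFS =====

theorem pvAInner_eq : ∀ (l x : List Char),
    pvAInner x l = (x ++ l.takeWhile pvWordc, l.dropWhile pvWordc) := by
  intro l
  induction l with
  | nil => intro x; simp [pvAInner]
  | cons c rest ih =>
    intro x
    by_cases h : pvWordc c = true <;>
      simp [pvAInner, h, ih]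

theorem pvALoop_eq_sub (vars : List (String × String)) :
    ∀ (n : Nat) (l acc : List Char), l.length ≤ n →
      pvALoop vars acc l = acc ++ pvSub vars l := by
  intro n
  induction n with
  | zero =>
    intro l acc h
    have : l = [] := List.eq_nil_of_length_eq_zero (Nat.le_zero.mp h)
    subst this
    simp [pvALoop, pvSub]
  | succ n ih =>
    intro l acc h
    cases l with
    | nil => simp [pvALoop, pvSub]
    | cons c rest =>
      by_cases hw : pvWordc c = true
      · rw [pvALoop, pvSub]
        simp only [hw, if_true, pvAInner_eq]
        have hlen : (rest.dropWhile pvWordc).length ≤ n := by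
          have := List.length_dropWhile_le pvWordc rest
          simp only [List.length_cons] at h
          omega
        rw [ih _ _ hlen]
        unfold pvRepl
        cases hg : (PySem.Dict.mk vars).get? (String.ofList (c :: rest.takeWhile pvWordc)) with
        | some v => simp [hg]
        | none => simp [hg]
      · rw [pvALoop, pvSub]
        simp only [hw, if_false, Bool.false_eq_true]
        have hlen : rest.length ≤ n := by
          simp only [List.length_cons] at h; omega
        rw [ih _ _ hlen]
        simp

-- ===== VERDICT (by name: the statement is the Claim_ definition above) =====
theorem replace_vars_in_formula_spec : Claim_equal_replace_vars_in_formula := by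
  intro vars formula _
  unfold Spec_replace_vars_in_formula replace_vars_in_formula replace_vars_in_formula_alt
  rw [pvALoop_eq_sub vars formula.toList.length formula.toList [] (le_refl _)]
  simp
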